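-- pv_equiv track=rewrite | github.com/anatolytkach/pages_books | tools/reader_render_v3/v3_core.py | estimate_token_width
-- ===== SOURCE A (Python) =====
-- def estimate_token_width(token: str) -> int:
--     width = 20
--     for char in token:
--         if char in "ilI.,:;!'|":
--             width += 6
--         elif char in "mwMWQG@%#&":
--             width += 15
--         else:
--             width += 11
--     return width
-- ===== SOURCE B (Python) =====
-- NARROW = "ilI.,:;!'|"
-- WIDE = "mwMWQG@%#&"
--
-- def estimate_token_width(token: str) -> int:
--     narrow = sum(1 for c in token if c in NARROW)
--     wide = sum(1 for c in token if c in WIDE)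
--     return 20 + 11 * len(token) - 5 * narrow + 4 * wide
-- ===== Notes on version B (the rewrite author's own statement) =====
-- stated objective: alternative
-- what changed: Replaced the per-character accumulating branch loop with a closed arithmetic formula: base 20+11*len(token) corrected by class counts (-5 per narrow char, +4 per wide char).
import Mathlib
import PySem

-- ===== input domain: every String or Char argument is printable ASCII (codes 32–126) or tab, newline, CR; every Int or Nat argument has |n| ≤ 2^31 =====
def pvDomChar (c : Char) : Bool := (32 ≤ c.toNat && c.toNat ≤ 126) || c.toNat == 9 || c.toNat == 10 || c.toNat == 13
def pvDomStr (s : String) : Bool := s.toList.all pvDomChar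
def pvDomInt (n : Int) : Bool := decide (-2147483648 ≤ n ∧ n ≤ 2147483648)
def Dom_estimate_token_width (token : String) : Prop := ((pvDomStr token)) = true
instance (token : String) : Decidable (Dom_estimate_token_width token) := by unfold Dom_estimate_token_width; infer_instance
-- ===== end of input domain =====

-- B replaces A's per-character accumulating branch loop with a closed formula
-- 20 + 11*len - 5*(narrow count) + 4*(wide count); alternative decomposition, same cost.


-- ===== PORT A =====
-- per-character loop accumulating width, branches in the source order
def estimate_token_width (token : String) : Int :=
  token.toList.foldl
    (fun width char =>
      if char ∈ "ilI.,:;!'|".toList then width + 6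
      else if char ∈ "mwMWQG@%#&".toList then width + 15
      else width + 11)
    20

-- ===== PORT B =====
-- Source B's module constants
def pvNarrow : String := "ilI.,:;!'|"
def pvWide : String := "mwMWQG@%#&"

-- closed formula from two filtered class counts
def estimate_token_width_alt (token : String) : Int :=
  let narrow : Int := (token.toList.countP (fun c => c ∈ pvNarrow.toList))
  let wide : Int := (token.toList.countP (fun c => c ∈ pvWide.toList))
  20 + 11 * PySem.Str.len token - 5 * narrow + 4 * wide

-- ===== PRECONDITION & SPEC =====
def Spec_estimate_token_width (token : String) (out : Int) : Prop := out = estimate_token_width_alt token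
instance (token : String) (out : Int) : Decidable (Spec_estimate_token_width token out) := by unfold Spec_estimate_token_width; infer_instance

-- ===== CLAIM (what is proved, stated in full; the proofs are below) =====
def Claim_equal_estimate_token_width : Prop := ∀ (token : String), Dom_estimate_token_width token → Spec_estimate_token_width token (estimate_token_width token)

-- ===== LEMMAS AND PROOFS =====
theorem pv_narrow_toList : "ilI.,:;!'|".toList = ['i','l','I','.',',',':',';','!','\'','|'] := by decide

theorem pv_wide_toList : "mwMWQG@%#&".toList = ['m','w','M','W','Q','G','@','%','#','&'] := by decide

theorem pv_disjoint : ∀ c ∈ "ilI.,:;!'|".toList, c ∉ "mwMWQG@%#&".toList := by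
  intro c hc
  rw [pv_narrow_toList] at hc
  rw [pv_wide_toList]
  simp at hc
  rcases hc with rfl|rfl|rfl|rfl|rfl|rfl|rfl|rfl|rfl|rfl <;> decide

theorem pv_fold_formula (l : List Char) (acc : Int) :
    l.foldl
      (fun width char =>
        if char ∈ "ilI.,:;!'|".toList then width + 6
        else if char ∈ "mwMWQG@%#&".toList then width + 15
        else width + 11)
      acc
    = acc + 11 * l.length - 5 * (l.countP (fun c => c ∈ pvNarrow.toList))
        + 4 * (l.countP (fun c => c ∈ pvWide.toList)) := by
  induction l generalizing acc with
  | nil => simp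
  | cons c cs ih =>
    simp only [List.foldl_cons, List.countP_cons, List.length_cons, ih, pvNarrow, pvWide]
    by_cases h1 : c ∈ "ilI.,:;!'|".toList
    · have h2 : c ∉ "mwMWQG@%#&".toList := pv_disjoint c h1
      simp at h1 h2
      simp [h1, h2]
      omega
    · by_cases h2 : c ∈ "mwMWQG@%#&".toList
      · simp at h1 h2
        simp [h1, h2]
        omega
      · simp at h1 h2
        simp [h1, h2]
        omega

-- ===== VERDICT (by name: the statement is the Claim_ definition above) =====
theorem estimate_token_width_spec : Claim_equal_estimate_token_width := by
  intro token _
  unfold Spec_estimate_token_width estimate_token_width estimate_token_width_alt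
  rw [pv_fold_formula, PySem.Str.len_eq]
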